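-- pv_equiv track=rewrite | github.com/olegJF/Checkio | Scientific Expedition/Scientific Expedition_Playfair cipher.py | getNumbers
-- ===== SOURCE A (Python) =====
-- def getNumbers(table, couple):
--     first, second = 0,0
--     cycle = 0
--     for row in table:
--         if couple[0] in row: first = cycle
--         if couple[1] in row: second = cycle
--         cycle +=1
--     return first, second
-- ===== SOURCE B (Python) =====
-- def getNumbers(table, couple):
--     index = {}
--     for i, row in enumerate(table):
--         for ch in row:
--             index[ch] = i
--     return index.get(couple[0], 0), index.get(couple[1], 0)
-- ===== Notes on version B (the rewrite author's own statement) =====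
-- stated objective: idiomatic
-- what changed: B builds a char-to-row-index dict in one pass over the table (later rows overwrite earlier ones) and then answers both queries by dict lookup with default 0, instead of A's per-row membership tests with a manual cycle counter.
import Mathlib
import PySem

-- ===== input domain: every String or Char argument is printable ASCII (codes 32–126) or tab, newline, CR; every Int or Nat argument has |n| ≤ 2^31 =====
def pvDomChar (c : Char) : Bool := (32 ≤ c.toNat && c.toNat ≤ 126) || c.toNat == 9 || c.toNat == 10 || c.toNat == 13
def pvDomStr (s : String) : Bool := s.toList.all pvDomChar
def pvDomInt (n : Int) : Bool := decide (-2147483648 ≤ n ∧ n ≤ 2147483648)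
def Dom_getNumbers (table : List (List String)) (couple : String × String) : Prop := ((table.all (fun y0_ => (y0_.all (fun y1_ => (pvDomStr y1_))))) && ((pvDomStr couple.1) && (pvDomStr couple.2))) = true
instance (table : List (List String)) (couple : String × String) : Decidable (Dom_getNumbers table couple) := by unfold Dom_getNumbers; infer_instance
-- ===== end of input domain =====

-- B replaces A's per-row membership scans with a one-pass char→row-index dict then two lookups (idiomatic alternative, same cost).
-- ===== PORT A =====
def getNumbers (table : List (List String)) (couple : String × String) : Int × Int :=
  let r := table.foldl
    (fun (st : Int × Int × Int) row =>
      (if couple.1 ∈ row then st.2.2 else st.1,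
       if couple.2 ∈ row then st.2.2 else st.2.1,
       st.2.2 + 1))
    (0, 0, 0)
  (r.1, r.2.1)

-- ===== PORT B =====
def getNumbers_alt (table : List (List String)) (couple : String × String) : Int × Int :=
  let index := (PySem.List.enumerate table).foldl
    (fun (d : PySem.Dict String Int) p => p.2.foldl (fun d ch => d.insert ch p.1) d)
    PySem.Dict.empty
  (index.getD couple.1 0, index.getD couple.2 0)

-- ===== PRECONDITION & SPEC =====
def Spec_getNumbers (table : List (List String)) (couple : String × String) (out : Int × Int) : Prop := out = getNumbers_alt table couple
instance (table : List (List String)) (couple : String × String) (out : Int × Int) : Decidable (Spec_getNumbers table couple out) := by unfold Spec_getNumbers; infer_instance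

-- ===== CLAIM (what is proved, stated in full; the proofs are below) =====
def Claim_equal_getNumbers : Prop := ∀ (table : List (List String)) (couple : String × String), Dom_getNumbers table couple → Spec_getNumbers table couple (getNumbers table couple)

-- ===== LEMMAS AND PROOFS =====

-- inserting every char of a row with value i: lookup is i iff the char is in the row
theorem getD_insert_row (row : List String) (i : Int) (d : PySem.Dict String Int) (c : String) :
    (row.foldl (fun d ch => d.insert ch i) d).getD c 0 = if c ∈ row then i else d.getD c 0 := by
  induction row generalizing d with
  | nil => simp
  | cons ch rest ih =>
    simp only [List.foldl_cons, ih, List.mem_cons, PySem.Dict.getD_insert]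
    by_cases h1 : c ∈ rest <;> by_cases h2 : c = ch <;> simp [h1, h2]

-- the combined invariant: A's fold components are B's dict lookups, and the counter is the length
theorem main_inv (table : List (List String)) (couple : String × String) :
    table.foldl
      (fun (st : Int × Int × Int) row =>
        (if couple.1 ∈ row then st.2.2 else st.1,
         if couple.2 ∈ row then st.2.2 else st.2.1,
         st.2.2 + 1))
      (0, 0, 0)
    = (((PySem.List.enumerate table).foldl
          (fun (d : PySem.Dict String Int) p => p.2.foldl (fun d ch => d.insert ch p.1) d)
          PySem.Dict.empty).getD couple.1 0,
       ((PySem.List.enumerate table).foldl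
          (fun (d : PySem.Dict String Int) p => p.2.foldl (fun d ch => d.insert ch p.1) d)
          PySem.Dict.empty).getD couple.2 0,
       (table.length : Int)) := by
  induction table using List.reverseRecOn with
  | nil => simp [PySem.List.enumerate]
  | append_singleton t r ih =>
    rw [List.foldl_append, ih, PySem.List.enumerate_append, List.foldl_append]
    simp only [PySem.List.enumerate, List.foldl_cons, List.foldl_nil, getD_insert_row,
      List.length_append, List.length_singleton]
    push_cast
    simp

-- ===== VERDICT (by name: the statement is the Claim_ definition above) =====
theorem getNumbers_spec : Claim_equal_getNumbers := by
  intro table couple _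
  show _ = _
  simp only [getNumbers, getNumbers_alt, main_inv]
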